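-- pv_equiv track=rewrite | github.com/MateoGiuffra/curso-python | challenges/battle_list.py | battle_list
-- ===== SOURCE A (Python) =====
-- def battle_list(list_a, list_b):
--     if len(list_a) != len(list_b):
--         return "Las listas deben ser de la misma longitud"
--
--     points = 0
--     score = {
--         "a": 0,
--         "b": 0
--     }
--     for i, a_num in enumerate(list_a):
--         a_value = a_num + score["a"]
--         b_value = list_b[i] + score["b"]
--         points = abs(a_value - b_value)
--         if a_value > b_value:
--             score["a"] = points
--             score["b"] = 0
--         else:
--             score["b"] = points
--             score["a"] = 0
--
--     last_winner = "a" if score["a"] != 0 else "b"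
--     return "x" if points == 0 else f"{points}{last_winner}"
-- ===== SOURCE B (Python) =====
-- def battle_list(list_a, list_b):
--     if len(list_a) != len(list_b):
--         return "Las listas deben ser de la misma longitud"
--     s = sum(x - y for x, y in zip(list_a, list_b))
--     return "x" if s == 0 else f"{abs(s)}{'a' if s > 0 else 'b'}"
-- ===== Notes on version B (the rewrite author's own statement) =====
-- stated objective: simpler
-- what changed: Replaces the mutable two-key score dict and per-step winner/loser case split with a single closed-form signed sum of pairwise differences over zip (the loser-zeroing plus winner-magnitude update is exactly a cumulative integer difference), which also drops the per-element dict/abs work.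
import Mathlib
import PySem

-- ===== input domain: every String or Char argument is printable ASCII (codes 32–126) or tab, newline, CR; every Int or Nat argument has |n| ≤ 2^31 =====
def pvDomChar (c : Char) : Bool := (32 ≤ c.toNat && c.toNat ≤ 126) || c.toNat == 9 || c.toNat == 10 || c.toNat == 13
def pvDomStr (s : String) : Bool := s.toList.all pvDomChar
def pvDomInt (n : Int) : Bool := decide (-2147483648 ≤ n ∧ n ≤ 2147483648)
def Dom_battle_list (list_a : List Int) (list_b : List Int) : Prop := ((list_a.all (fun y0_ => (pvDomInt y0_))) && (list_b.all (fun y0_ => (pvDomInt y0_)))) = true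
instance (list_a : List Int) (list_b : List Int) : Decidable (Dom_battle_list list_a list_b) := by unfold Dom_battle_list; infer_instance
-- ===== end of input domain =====

-- ===== PORT A =====
-- B replaces A's two-key score dict and winner/loser case split by one signed
-- cumulative sum of pairwise differences (simpler decomposition; same cost).
-- Step of A's loop: state = (points, score_a, score_b).
def battle_step (st : Int × Int × Int) (p : Int × Int) : Int × Int × Int :=
  let a_value := p.2 + st.2.1
  let b_value := p.1 + st.2.2
  let points := |a_value - b_value|
  if a_value > b_value then (points, points, 0) else (points, 0, points)

def battle_list (list_a : List Int) (list_b : List Int) : String :=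
  if list_a.length ≠ list_b.length then "Las listas deben ser de la misma longitud"
  else
    -- loop over enumerate(list_a); list_b[i] is always in range under the guard,
    -- so pyGetD with default 0 is exact here
    let st := (PySem.List.enumerate list_a 0).foldl
      (fun st p => battle_step st (PySem.List.pyGetD list_b p.1 0, p.2)) (0, 0, 0)
    let last_winner := if st.2.1 ≠ 0 then "a" else "b"
    if st.1 = 0 then "x" else PySem.Int.toStr st.1 ++ last_winner

-- ===== PORT B =====
def battle_list_alt (list_a : List Int) (list_b : List Int) : String :=
  if list_a.length ≠ list_b.length then "Las listas deben ser de la misma longitud"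
  else
    let s := (list_a.zip list_b).foldl (fun acc p => acc + (p.1 - p.2)) 0
    if s = 0 then "x" else PySem.Int.toStr |s| ++ (if s > 0 then "a" else "b")

-- ===== PRECONDITION & SPEC =====
def Spec_battle_list (list_a : List Int) (list_b : List Int) (out : String) : Prop := out = battle_list_alt list_a list_b
instance (list_a : List Int) (list_b : List Int) (out : String) : Decidable (Spec_battle_list list_a list_b out) := by unfold Spec_battle_list; infer_instance

-- ===== CLAIM (what is proved, stated in full; the proofs are below) =====
def Claim_equal_battle_list : Prop := ∀ (list_a : List Int) (list_b : List Int), Dom_battle_list list_a list_b → Spec_battle_list list_a list_b (battle_list list_a list_b)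

-- ===== LEMMAS AND PROOFS =====

-- A's score state is a function of the signed lead d = score_a - score_b.
def leadState (d : Int) : Int × Int × Int :=
  (|d|, if 0 < d then d else 0, if 0 < d then 0 else -d)

theorem battle_step_leadState (d : Int) (p : Int × Int) :
    battle_step (leadState d) (p.1, p.2) = leadState (d + (p.2 - p.1)) := by
  unfold battle_step leadState
  by_cases h : 0 < d <;> by_cases h2 : 0 < d + (p.2 - p.1) <;>
    simp only [h, h2, if_true, if_false]
  all_goals
    split_ifs <;> simp only [Prod.mk.injEq, Int.abs_eq_natAbs, and_true, true_and] <;> omega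

-- Folding A's step from a lead state tracks the cumulative sum of differences.
theorem foldl_battle_step (ps : List (Int × Int)) (d : Int) :
    ps.foldl (fun st p => battle_step st (p.1, p.2)) (leadState d)
      = leadState (ps.foldl (fun acc p => acc + (p.2 - p.1)) d) := by
  induction ps generalizing d with
  | nil => rfl
  | cons p ps ih =>
    simp only [List.foldl_cons, battle_step_leadState, ih]

-- A's enumerate-and-index loop is the same fold over the swapped zip.
theorem enumerate_index_fold (la : List Int) (pre lb : List Int)
    (h : la.length = lb.length) (st : Int × Int × Int) :
    (PySem.List.enumerate la (pre.length : Int)).foldl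
        (fun st p => battle_step st (PySem.List.pyGetD (pre ++ lb) p.1 0, p.2)) st
      = ((lb.zip la).foldl (fun st p => battle_step st (p.1, p.2)) st) := by
  induction la generalizing pre lb st with
  | nil =>
    cases lb with
    | nil => rfl
    | cons b lb => simp at h
  | cons a la ih =>
    cases lb with
    | nil => simp at h
    | cons b lb =>
      simp only [PySem.List.enumerate_cons, List.zip_cons_cons, List.foldl_cons]
      have hget : PySem.List.pyGetD (pre ++ b :: lb) (pre.length : Int) 0 = b := by
        rw [PySem.List.pyGetD_natCast]
        simp [List.getD_eq_getElem?_getD]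
      rw [hget]
      have hlen : ((pre.length : Int) + 1) = (((pre ++ [b]).length : Nat) : Int) := by
        simp
      rw [hlen]
      have := ih (pre ++ [b]) lb (by simpa using h)
        (battle_step st (b, a))
      simpa using this

-- The two zip orders sum the same differences.
theorem zip_swap_sum (la : List Int) (lb : List Int) (d : Int) :
    (lb.zip la).foldl (fun acc p => acc + (p.2 - p.1)) d
      = (la.zip lb).foldl (fun acc p => acc + (p.1 - p.2)) d := by
  induction la generalizing lb d with
  | nil => cases lb <;> rfl
  | cons a la ih =>
    cases lb with
    | nil => rfl
    | cons b lb => simp only [List.zip_cons_cons, List.foldl_cons, ih]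

-- The final formatting of A's state agrees with B's closed form.
theorem out_eq (S : Int) :
    (if (leadState S).1 = 0 then "x"
     else PySem.Int.toStr (leadState S).1 ++ (if (leadState S).2.1 ≠ 0 then "a" else "b"))
      = (if S = 0 then "x" else PySem.Int.toStr |S| ++ (if S > 0 then "a" else "b")) := by
  unfold leadState
  by_cases h : S = 0
  · subst h; simp
  · rw [if_neg (abs_ne_zero.mpr h), if_neg h]
    by_cases hp : 0 < S
    · simp only [hp, if_true, ne_eq, h, not_false_eq_true]
    · simp only [hp, if_false, ne_eq, not_true_eq_false]

-- ===== VERDICT (by name: the statement is the Claim_ definition above) =====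
theorem battle_list_spec : Claim_equal_battle_list := by
  intro la lb _
  unfold Spec_battle_list battle_list battle_list_alt
  by_cases h : la.length = lb.length
  · simp only [h, ne_eq, not_true_eq_false, if_false]
    have h1 := enumerate_index_fold la ([] : List Int) lb h (0, 0, 0)
    simp only [List.nil_append, List.length_nil, Nat.cast_zero] at h1
    have h0 : ((0, 0, 0) : Int × Int × Int) = leadState 0 := rfl
    rw [h1, h0, foldl_battle_step, zip_swap_sum la lb 0]
    exact out_eq _
  · simp [h]
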